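-- pv_equiv track=rewrite | github.com/kmlefran/compchem-si | compchem_si/si_generation.py | _get_molformula
-- ===== SOURCE A (Python) =====
-- def _get_molformula(at_symbs):
--     """Converts list of atomic symbols to molecular formula"""
--     out_dict = {s: at_symbs.count(s) for s in set(at_symbs)}
--     out_str = ""
--     # sort alphabetically by key
--     sorted_dict = dict(sorted(out_dict.items()))
--     for key, value in sorted_dict.items():
--         if value != 1:
--             out_str += f"{key}{value}"
--         else:
--             # 1 atom, don't put the number
--             out_str += f"{key}"
--     return out_str
-- ===== SOURCE B (Python) =====
-- def _get_molformula(at_symbs):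
--     """Converts list of atomic symbols to molecular formula"""
--     parts = []
--     cur = None
--     cnt = 0
--     for s in sorted(at_symbs):
--         if s == cur:
--             cnt += 1
--         else:
--             if cur is not None:
--                 parts.append(cur if cnt == 1 else cur + str(cnt))
--             cur = s
--             cnt = 1
--     if cur is not None:
--         parts.append(cur if cnt == 1 else cur + str(cnt))
--     return "".join(parts)
-- ===== Notes on version B (the rewrite author's own statement) =====
-- stated objective: faster
-- what changed: Replaces the set/.count frequency dict (which rescans the whole list once per distinct symbol) by a single run-length pass over the sorted symbol list, tracking the current symbol and its running count.
import Mathlib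
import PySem

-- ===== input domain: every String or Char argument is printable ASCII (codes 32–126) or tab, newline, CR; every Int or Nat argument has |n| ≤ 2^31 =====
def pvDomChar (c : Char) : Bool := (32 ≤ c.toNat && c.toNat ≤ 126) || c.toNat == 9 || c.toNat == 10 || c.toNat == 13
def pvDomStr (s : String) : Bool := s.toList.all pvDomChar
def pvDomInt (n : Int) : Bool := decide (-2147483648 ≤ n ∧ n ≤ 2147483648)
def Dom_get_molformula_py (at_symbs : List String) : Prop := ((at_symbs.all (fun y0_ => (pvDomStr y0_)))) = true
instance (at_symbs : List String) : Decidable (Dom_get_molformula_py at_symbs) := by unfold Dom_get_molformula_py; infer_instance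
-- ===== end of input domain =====

-- B replaces A's set/.count frequency dict by a single run-length pass over the sorted symbol list (idiomatic; same result).

-- ===== PORT A =====
-- A: out_dict = {s: at_symbs.count(s) for s in set(at_symbs)}; dict(sorted(items)); concatenate key(+count).
-- The dict-comprehension iterates set(at_symbs) in hash order, but the items are sorted before any use,
-- so the result is order-independent; we iterate the Set in first-occurrence order.
-- Keys are distinct, so Python's tuple comparison in sorted(out_dict.items()) never reaches the value
-- component: sorting by the key alone is exact here.
-- Strings are built on the List Char side (String.ofList at the end), as the PySem prelude prescribes.
def get_molformula_py (at_symbs : List String) : String :=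
  let out_dict : List (String × Int) :=
    (PySem.Set.ofList at_symbs).map (fun s => (s, (PySem.List.count at_symbs s : Int)))
  let sorted_dict := PySem.List.sorted out_dict (fun kv => kv.1)
  let out_str : List Char := sorted_dict.foldl
    (fun acc kv =>
      if kv.2 ≠ 1 then acc ++ kv.1.toList ++ PySem.Int.toChars kv.2
      else acc ++ kv.1.toList) []
  String.ofList out_str

-- ===== PORT B =====
-- B: parts/cur/cnt run-length loop over sorted(at_symbs), flush after the loop, "".join(parts).
-- chunk built when a run ends: cur if cnt == 1 else cur + str(cnt)  (on the List Char side)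
def pvChunk (c : String) (cnt : Int) : List Char :=
  if cnt == 1 then c.toList else c.toList ++ PySem.Int.toChars cnt

-- one iteration of B's for-loop; state = (parts, cur, cnt); 's == cur' is False while cur is None
def pvStep (st : List (List Char) × Option String × Int) (s : String) :
    List (List Char) × Option String × Int :=
  match st with
  | (parts, some c, cnt) =>
      if s == c then (parts, some c, cnt + 1)
      else (parts ++ [pvChunk c cnt], some s, 1)
  | (parts, none, _) => (parts, some s, 1)

def get_molformula_py_alt (at_symbs : List String) : String :=
  -- final match = the 'if cur is not None: parts.append(...)' flush; "".join(parts) = String.ofList parts.flatten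
  match (PySem.List.sorted at_symbs (fun x => x)).foldl pvStep ([], none, 0) with
  | (parts, some c, cnt) => String.ofList (parts ++ [pvChunk c cnt]).flatten
  | (parts, none, _) => String.ofList parts.flatten

-- ===== PRECONDITION & SPEC =====
def Spec_get_molformula_py (at_symbs : List String) (out : String) : Prop := out = get_molformula_py_alt at_symbs
instance (at_symbs : List String) (out : String) : Decidable (Spec_get_molformula_py at_symbs out) := by unfold Spec_get_molformula_py; infer_instance

-- ===== CLAIM (what is proved, stated in full; the proofs are below) =====
def Claim_equal_get_molformula_py : Prop := ∀ (at_symbs : List String), Dom_get_molformula_py at_symbs → Spec_get_molformula_py at_symbs (get_molformula_py at_symbs)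

-- ===== LEMMAS AND PROOFS =====

-- the flush applied to a loop state, as a list of chunks
def pvFinal (st : List (List Char) × Option String × Int) : List (List Char) :=
  match st with
  | (parts, some c, cnt) => parts ++ [pvChunk c cnt]
  | (parts, none, _) => parts

lemma pvAlt_eq_final (l : List String) :
    get_molformula_py_alt l =
      String.ofList (pvFinal ((PySem.List.sorted l (fun x => x)).foldl pvStep ([], none, 0))).flatten := by
  unfold get_molformula_py_alt pvFinal
  rcases (PySem.List.sorted l (fun x => x)).foldl pvStep ([], none, 0) with ⟨p, c, n⟩
  cases c <;> rfl

-- B's loop over a run of the current symbol only bumps the counter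
lemma pvStep_replicate (m : Nat) : ∀ (parts : List (List Char)) (c : String) (cnt : Int),
    (List.replicate m c).foldl pvStep (parts, some c, cnt) = (parts, some c, cnt + m) := by
  induction m with
  | zero => intro parts c cnt; simp
  | succ n ih =>
    intro parts c cnt
    rw [List.replicate_succ, List.foldl_cons]
    simp only [pvStep, beq_self_eq_true, if_true]
    rw [ih]
    have : cnt + 1 + (n : Int) = cnt + ((n + 1 : Nat) : Int) := by push_cast; ring
    rw [this]

-- B's loop over the remaining runs, one chunk per run
lemma pvRun (cntf : String → Nat) : ∀ (ks : List String) (c : String) (parts : List (List Char)) (cnt : Int),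
    (c :: ks).Pairwise (· < ·) → (∀ k ∈ ks, 1 ≤ cntf k) →
    pvFinal ((ks.flatMap (fun k => List.replicate (cntf k) k)).foldl pvStep (parts, some c, cnt))
      = parts ++ [pvChunk c cnt] ++ ks.map (fun k => pvChunk k ((cntf k : Nat) : Int)) := by
  intro ks
  induction ks with
  | nil => intro c parts cnt _ _; simp [pvFinal]
  | cons k ks ih =>
    intro c parts cnt hpw hpos
    have hck : c < k := (List.pairwise_cons.mp hpw).1 k (by simp)
    have hk1 : 1 ≤ cntf k := hpos k (by simp)
    obtain ⟨m, hm⟩ : ∃ m, cntf k = m + 1 := ⟨cntf k - 1, by omega⟩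
    rw [List.flatMap_cons, List.foldl_append, hm, List.replicate_succ, List.foldl_cons]
    have hne : (k == c) = false := beq_eq_false_iff_ne.mpr (ne_of_gt hck)
    simp only [pvStep, hne, Bool.false_eq_true, if_false]
    rw [pvStep_replicate]
    have hpw' : (k :: ks).Pairwise (· < ·) := (List.pairwise_cons.mp hpw).2
    rw [ih k (parts ++ [pvChunk c cnt]) (1 + m) hpw' (fun k' hk' => hpos k' (List.mem_cons_of_mem _ hk'))]
    have : (1 : Int) + (m : Int) = ((m + 1 : Nat) : Int) := by push_cast; ring
    simp [this, hm, List.append_assoc]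

-- counting in a flatMap of runs over distinct keys
lemma pvCount_flatMap (cntf : String → Nat) : ∀ (ks : List String), ks.Nodup → ∀ (x : String),
    ((ks.flatMap (fun k => List.replicate (cntf k) k)).count x) = if x ∈ ks then cntf x else 0 := by
  intro ks
  induction ks with
  | nil => simp
  | cons k ks ih =>
    intro hnd x
    rw [List.flatMap_cons, List.count_append, List.count_replicate, ih (List.nodup_cons.mp hnd).2 x]
    by_cases hxk : x = k
    · subst hxk
      simp [(List.nodup_cons.mp hnd).1]
    · simp [hxk, Ne.symm hxk]

-- the run-length decomposition of the sorted list
lemma pvSorted_eq_RL (l : List String) :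
    PySem.List.sorted l (fun x => x) =
      (PySem.List.sorted (PySem.Set.ofList l) (fun x => x)).flatMap
        (fun k => List.replicate (l.count k) k) := by
  apply PySem.List.sorted_id_eq_of_perm_of_pairwise
  · -- permutation, via counts
    rw [List.perm_iff_count]
    intro x
    have hnd : (PySem.List.sorted (PySem.Set.ofList l) (fun x => x)).Nodup :=
      ((PySem.List.sorted_perm (PySem.Set.ofList l) (fun x => x) false).nodup_iff).mpr
        (PySem.Set.nodup_ofList l)
    rw [pvCount_flatMap (fun k => l.count k) _ hnd x]
    by_cases hx : x ∈ l
    · have : x ∈ PySem.List.sorted (PySem.Set.ofList l) (fun x => x) := by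
        rw [PySem.List.mem_sorted, PySem.Set.mem_ofList]; exact hx
      simp [this]
    · have : x ∉ PySem.List.sorted (PySem.Set.ofList l) (fun x => x) := by
        rw [PySem.List.mem_sorted, PySem.Set.mem_ofList]; exact hx
      simp [this, List.count_eq_zero.mpr hx]
  · -- sortedness of the run-length list
    have hpw := PySem.List.sorted_ofList_pairwise_lt l
    generalize (PySem.List.sorted (PySem.Set.ofList l) (fun x => x)) = ks at hpw ⊢
    induction ks with
    | nil => simp
    | cons k ks ih =>
      rw [List.flatMap_cons]
      apply List.pairwise_append.mpr
      refine ⟨?_, ih (List.pairwise_cons.mp hpw).2, ?_⟩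
      · exact List.pairwise_replicate.mpr (Or.inr le_rfl)
      · intro a ha b hb
        obtain ⟨k', hk', hb'⟩ := List.mem_flatMap.mp hb
        rw [List.eq_of_mem_replicate ha, List.eq_of_mem_replicate hb']
        exact le_of_lt ((List.pairwise_cons.mp hpw).1 k' hk')

-- A computes one chunk per sorted distinct symbol
lemma pvA_eq (l : List String) :
    get_molformula_py l =
      String.ofList (((PySem.List.sorted (PySem.Set.ofList l) (fun x => x)).map
        (fun k => pvChunk k ((l.count k : Nat) : Int))).flatten) := by
  unfold get_molformula_py
  have hsorted : PySem.List.sorted ((PySem.Set.ofList l).map (fun s => (s, (PySem.List.count l s : Int)))) (fun kv => kv.1)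
      = (PySem.List.sorted (PySem.Set.ofList l) (fun x => x)).map (fun k => (k, (PySem.List.count l k : Int))) := by
    apply PySem.List.sorted_eq_of_perm_of_pairwise_lt
    · exact (PySem.List.sorted_perm (PySem.Set.ofList l) (fun x => x) false).map _
    · exact (PySem.List.sorted_ofList_pairwise_lt l).map _ (fun a b h => h)
  simp only [hsorted]
  have hfun : (fun (acc : List Char) (kv : String × Int) =>
      if kv.2 ≠ 1 then acc ++ kv.1.toList ++ PySem.Int.toChars kv.2 else acc ++ kv.1.toList)
      = fun acc kv => acc ++ pvChunk kv.1 kv.2 := by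
    funext acc kv
    by_cases h : kv.2 = 1 <;> simp [pvChunk, h]
  rw [hfun, PySem.List.foldl_append_eq_flatMap]
  simp [PySem.List.count_eq, Function.comp_def, List.flatMap_def]

-- B computes the same chunks via the run-length loop
lemma pvB_eq (l : List String) :
    get_molformula_py_alt l =
      String.ofList (((PySem.List.sorted (PySem.Set.ofList l) (fun x => x)).map
        (fun k => pvChunk k ((l.count k : Nat) : Int))).flatten) := by
  rw [pvAlt_eq_final, pvSorted_eq_RL]
  cases hks : PySem.List.sorted (PySem.Set.ofList l) (fun x => x) with
  | nil => simp [pvFinal]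
  | cons c ks =>
    have hpw : (c :: ks).Pairwise (· < ·) := by
      have := PySem.List.sorted_ofList_pairwise_lt l
      rwa [hks] at this
    have hmem : ∀ k ∈ c :: ks, 1 ≤ l.count k := by
      intro k hk
      have hkl : k ∈ l := by
        have : k ∈ PySem.List.sorted (PySem.Set.ofList l) (fun x => x) := by rw [hks]; exact hk
        rwa [PySem.List.mem_sorted, PySem.Set.mem_ofList] at this
      exact List.count_pos_iff.mpr hkl
    obtain ⟨m, hm⟩ : ∃ m, l.count c = m + 1 := ⟨l.count c - 1, by have := hmem c (by simp); omega⟩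
    rw [List.flatMap_cons, List.foldl_append, hm, List.replicate_succ, List.foldl_cons]
    simp only [pvStep]
    rw [pvStep_replicate]
    rw [pvRun (fun k => l.count k) ks c [] (1 + m) hpw
      (fun k' hk' => hmem k' (List.mem_cons_of_mem _ hk'))]
    have hc : (1 : Int) + (m : Int) = ((l.count c : Nat) : Int) := by rw [hm]; push_cast; ring
    simp [hc]

-- ===== VERDICT (by name: the statement is the Claim_ definition above) =====
theorem get_molformula_py_spec : Claim_equal_get_molformula_py := by
  intro l _
  unfold Spec_get_molformula_py
  rw [pvA_eq, pvB_eq]
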